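-- pv_equiv track=rewrite | github.com/inaciovasquez2020/cyclone-terminal-obstruction | scripts/cfi/expander/cfi_expander.py | cfi_expander_lift
-- ===== SOURCE A (Python) =====
-- def cfi_expander_lift(G, b):
--     H = {}
--     for v in G:
--         for s in (0,1):
--             H[(v,s)] = set()
--     for v in G:
--         for u in G[v]:
--             if v<u:
--                 a = b[v]^b[u]
--                 for s in (0,1):
--                     H[(v,s)].add((u,s^a))
--                     H[(u,s^a)].add((v,s))
--     lab = {v:i for i,v in enumerate(sorted(H))}
--     return {lab[v]:{lab[u] for u in H[v]} for v in H}
-- ===== SOURCE B (Python) =====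
-- def cfi_expander_lift(G, b):
--     # Row-major recomputation: no mutable double-updated graph; each output row
--     # (v,t) is gathered independently by a single scan over the vertex list
--     # (forward neighbours from v's own adjacency, backward ones from smaller
--     # vertices' adjacencies), then labeled through the sorted key order.
--     vs = list(G)
--     lab = {k: i for i, k in enumerate(sorted((v, s) for v in vs for s in (0, 1)))}
--     def row(v, t):
--         seq = []
--         for w in vs:
--             if w == v:
--                 seq.extend((u, t ^ (b[v] ^ b[u])) for u in G[v] if v < u)
--             elif w < v and v in G[w]:
--                 seq.append((w, t ^ (b[w] ^ b[v])))
--         return {lab[k] for k in dict.fromkeys(seq)}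
--     return {lab[(v, t)]: row(v, t) for v in vs for t in (0, 1)}
-- ===== Notes on version B (the rewrite author's own statement) =====
-- stated objective: alternative
-- what changed: B abandons A's mutable tuple-keyed graph with symmetric double-sided edge updates and final relabeling pass: it computes each output row (v,t) independently by one read-only scan over the vertex list (forward neighbours from v's own adjacency, backward neighbours from smaller vertices' adjacency lists) and emits integer labels directly.
import Mathlib
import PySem

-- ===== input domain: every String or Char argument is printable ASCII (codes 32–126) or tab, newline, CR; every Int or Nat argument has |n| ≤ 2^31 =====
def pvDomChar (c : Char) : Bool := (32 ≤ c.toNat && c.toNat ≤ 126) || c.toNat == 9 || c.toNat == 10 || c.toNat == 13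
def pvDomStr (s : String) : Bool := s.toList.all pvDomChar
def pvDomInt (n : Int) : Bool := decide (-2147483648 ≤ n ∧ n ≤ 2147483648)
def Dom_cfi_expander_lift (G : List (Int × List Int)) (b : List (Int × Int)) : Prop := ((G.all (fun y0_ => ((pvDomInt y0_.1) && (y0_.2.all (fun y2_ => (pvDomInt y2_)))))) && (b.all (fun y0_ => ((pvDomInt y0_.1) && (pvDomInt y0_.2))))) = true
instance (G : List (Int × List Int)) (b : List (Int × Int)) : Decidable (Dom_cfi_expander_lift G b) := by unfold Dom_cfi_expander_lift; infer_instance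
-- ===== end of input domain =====

-- B replaces A's mutable tuple-keyed graph with symmetric double-sided edge updates and final
-- relabeling pass by a row-major recomputation: each output row is gathered independently by one
-- read-only scan over the vertex list (objective: alternative; return-value equivalence on Pre_).

-- ===== PORT A =====
def cfi_expander_lift (G : List (Int × List Int)) (b : List (Int × Int)) : List (Int × List Int) :=
  let Gd : PySem.Dict Int (List Int) := PySem.Dict.mk G
  let bd : PySem.Dict Int Int := PySem.Dict.mk b
  -- H = {}; for v in G: for s in (0,1): H[(v,s)] = set()
  let H0 : PySem.Dict (Int × Int) (PySem.Set (Int × Int)) :=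
    Gd.keys.foldl (fun H v =>
      [(0 : Int), 1].foldl (fun H s => H.insert (v, s) PySem.Set.empty) H) PySem.Dict.empty
  -- for v in G: for u in G[v]: if v<u: a = b[v]^b[u]; for s in (0,1): H[(v,s)].add((u,s^a)); H[(u,s^a)].add((v,s))
  let H1 : PySem.Dict (Int × Int) (PySem.Set (Int × Int)) :=
    Gd.keys.foldl (fun H v =>
      (Gd.getD v []).foldl (fun H u =>
        if v < u then
          let a := PySem.Int.bxor (bd.getD v 0) (bd.getD u 0)
          [(0 : Int), 1].foldl (fun H s =>
            let H' := H.modify (v, s) [] (fun S => PySem.Set.add S (u, PySem.Int.bxor s a))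
            H'.modify (u, PySem.Int.bxor s a) [] (fun S => PySem.Set.add S (v, s))) H
        else H) H) H0
  -- lab = {v:i for i,v in enumerate(sorted(H))}   (tuple keys: lexicographic sort)
  let lab : PySem.Dict (Int × Int) Int :=
    (PySem.List.enumerate (PySem.List.sorted2 H1.keys (fun p => p.1) (fun p => p.2) false) 0).foldl
      (fun d p => d.insert p.2 p.1) PySem.Dict.empty
  -- return {lab[v]:{lab[u] for u in H[v]} for v in H}
  let out : PySem.Dict Int (PySem.Set Int) :=
    H1.items.foldl (fun r p =>
      r.insert (lab.getD p.1 0) (PySem.Set.ofList (p.2.map (fun u => lab.getD u 0)))) PySem.Dict.empty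
  out.items

-- ===== PORT B =====
def cfi_expander_lift_alt (G : List (Int × List Int)) (b : List (Int × Int)) : List (Int × List Int) :=
  let Gd : PySem.Dict Int (List Int) := PySem.Dict.mk G
  let bd : PySem.Dict Int Int := PySem.Dict.mk b
  -- vs = list(G)
  let vs : List Int := Gd.keys
  -- lab = {k: i for i, k in enumerate(sorted((v, s) for v in vs for s in (0, 1)))}
  let lab : PySem.Dict (Int × Int) Int :=
    (PySem.List.enumerate
        (PySem.List.sorted2 (vs.flatMap (fun v => [((v : Int), (0 : Int)), (v, 1)]))
          (fun p => p.1) (fun p => p.2) false) 0).foldl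
      (fun d p => d.insert p.2 p.1) PySem.Dict.empty
  -- def row(v, t): one read-only scan over vs gathering this row's neighbour sequence
  let row : Int → Int → PySem.Set Int := fun v t =>
    let seq : List (Int × Int) := vs.foldl (fun seq w =>
      if w == v then
        -- seq.extend((u, t ^ (b[v] ^ b[u])) for u in G[v] if v < u)
        seq ++ ((Gd.getD v []).filter (fun u => decide (v < u))).map
          (fun u => (u, PySem.Int.bxor t (PySem.Int.bxor (bd.getD v 0) (bd.getD u 0))))
      else if decide (w < v) && (Gd.getD w []).contains v then
        -- seq.append((w, t ^ (b[w] ^ b[v])))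
        seq ++ [(w, PySem.Int.bxor t (PySem.Int.bxor (bd.getD w 0) (bd.getD v 0)))]
      else seq) []
    -- {lab[k] for k in dict.fromkeys(seq)}
    PySem.Set.ofList ((PySem.List.dedup seq).map (fun k => lab.getD k 0))
  -- return {lab[(v, t)]: row(v, t) for v in vs for t in (0, 1)}
  (vs.foldl (fun r v =>
      [(0 : Int), 1].foldl (fun r t => r.insert (lab.getD (v, t) 0) (row v t)) r)
    PySem.Dict.empty).items

-- ===== PRECONDITION & SPEC =====
-- Pre_ excludes exactly the inputs on which the Python A raises (KeyError): a duplicate key in G or b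
-- cannot arise from a Python dict at all (Nodup is the dict shape), and for each processed edge v<u the
-- endpoint u must be a vertex of G, both endpoints must be labeled in b, and b[v]^b[u] must be 0 or 1
-- (otherwise H[(u,s^a)] is a missing key and A raises KeyError).
def Pre_cfi_expander_lift (G : List (Int × List Int)) (b : List (Int × Int)) : Prop :=
  (G.map Prod.fst).Nodup ∧ (b.map Prod.fst).Nodup ∧
  ∀ p ∈ G, ∀ u ∈ p.2, p.1 < u →
    u ∈ G.map Prod.fst ∧ p.1 ∈ b.map Prod.fst ∧ u ∈ b.map Prod.fst ∧
    (PySem.Int.bxor ((PySem.Dict.mk b).getD p.1 0) ((PySem.Dict.mk b).getD u 0) = 0 ∨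
     PySem.Int.bxor ((PySem.Dict.mk b).getD p.1 0) ((PySem.Dict.mk b).getD u 0) = 1)
instance (G : List (Int × List Int)) (b : List (Int × Int)) : Decidable (Pre_cfi_expander_lift G b) := by
  unfold Pre_cfi_expander_lift; infer_instance

def pvWitness_cfi_expander_lift : (List (Int × List Int)) × (List (Int × Int)) :=
  ([(0, [1]), (1, [0])], [(0, 0), (1, 1)])

def Spec_cfi_expander_lift (G : List (Int × List Int)) (b : List (Int × Int)) (out : List (Int × List Int)) : Prop := out = cfi_expander_lift_alt G b
instance (G : List (Int × List Int)) (b : List (Int × Int)) (out : List (Int × List Int)) : Decidable (Spec_cfi_expander_lift G b out) := by unfold Spec_cfi_expander_lift; infer_instance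

-- ===== CLAIM (what is proved, stated in full; the proofs are below) =====
def Claim_equal_cfi_expander_lift : Prop := ∀ (G : List (Int × List Int)) (b : List (Int × Int)), Dom_cfi_expander_lift G b → Pre_cfi_expander_lift G b → Spec_cfi_expander_lift G b (cfi_expander_lift G b)

-- ===== LEMMAS AND PROOFS =====

def pvPairs (v : Int) : List (Int × Int) := [(v, 0), (v, 1)]
def pvKof (ks : List Int) : List (Int × Int) := ks.flatMap pvPairs
def pvEnumDict {α : Type} [BEq α] (L : List α) : PySem.Dict α Int :=
  (PySem.List.enumerate L 0).foldl (fun d p => d.insert p.2 p.1) PySem.Dict.empty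

-- the per-key contribution of processing vertex w in A's edge loop = one step of B's row scan
def pvContrib (Gd : PySem.Dict Int (List Int)) (bd : PySem.Dict Int Int)
    (k : Int × Int) (w : Int) : List (Int × Int) :=
  if w = k.1 then
    ((Gd.getD k.1 []).filter (fun u => decide (k.1 < u))).map
      (fun u => (u, PySem.Int.bxor k.2 (PySem.Int.bxor (bd.getD k.1 0) (bd.getD u 0))))
  else if w < k.1 ∧ (Gd.getD w []).contains k.1 then
    [(w, PySem.Int.bxor k.2 (PySem.Int.bxor (bd.getD w 0) (bd.getD k.1 0)))]
  else []

-- partial contribution of vertex w while only the adjacency prefix Q has been processed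
def pvPartial (_Gd : PySem.Dict Int (List Int)) (bd : PySem.Dict Int Int)
    (w : Int) (Q : List Int) (k : Int × Int) : List (Int × Int) :=
  if k.1 = w then
    (Q.filter (fun u => decide (w < u))).map
      (fun u => (u, PySem.Int.bxor k.2 (PySem.Int.bxor (bd.getD w 0) (bd.getD u 0))))
  else if w < k.1 ∧ Q.contains k.1 then
    [(w, PySem.Int.bxor k.2 (PySem.Int.bxor (bd.getD w 0) (bd.getD k.1 0)))]
  else []

-- pointwise update of a value function (the shape a Dict.modify leaves on map-form items)
def pvUpd (g : (Int × Int) → List (Int × Int)) (k0 : Int × Int)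
    (f : List (Int × Int) → List (Int × Int)) : (Int × Int) → List (Int × Int) :=
  fun k => if k = k0 then f (g k0) else g k

theorem pvUpd_ne (g : (Int × Int) → List (Int × Int)) (k0 : Int × Int)
    (f : List (Int × Int) → List (Int × Int)) (k : Int × Int) (h : ¬ k = k0) :
    pvUpd g k0 f k = g k := if_neg h

theorem pvUpd_eq (g : (Int × Int) → List (Int × Int)) (k0 : Int × Int)
    (f : List (Int × Int) → List (Int × Int)) (k : Int × Int) (h : k = k0) :
    pvUpd g k0 f k = f (g k0) := by rw [pvUpd, if_pos h]

theorem pvMem_Kof (ks : List Int) (x : Int × Int) :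
    x ∈ pvKof ks ↔ x.1 ∈ ks ∧ (x.2 = 0 ∨ x.2 = 1) := by
  simp only [pvKof, List.mem_flatMap, pvPairs, List.mem_cons]
  constructor
  · rintro ⟨v, hv, h | h | h⟩
    · subst h; simp_all
    · subst h; simp_all
    · simp at h
  · rintro ⟨h1, h2 | h2⟩
    · exact ⟨x.1, h1, Or.inl (by rw [← h2])⟩
    · exact ⟨x.1, h1, Or.inr (Or.inl (by rw [← h2]))⟩

theorem pvNodup_Kof (ks : List Int) (h : ks.Nodup) : (pvKof ks).Nodup := by
  induction ks with
  | nil => simp [pvKof]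
  | cons a t ih =>
    simp only [pvKof, List.flatMap_cons] at *
    have ha : a ∉ t := (List.nodup_cons.mp h).1
    have ht := ih (List.nodup_cons.mp h).2
    simp only [pvPairs, List.cons_append, List.nil_append]
    refine List.nodup_cons.mpr ⟨?_, List.nodup_cons.mpr ⟨?_, ht⟩⟩
    · intro hc
      rcases List.mem_cons.mp hc with h1 | h1
      · exact absurd h1 (by simp)
      · have := (pvMem_Kof t (a, 0)).mp h1
        exact ha this.1
    · intro hc
      have := (pvMem_Kof t (a, 1)).mp hc
      exact ha this.1

theorem pvEnumDict_items {α : Type} [BEq α] [LawfulBEq α] (L : List α) (h : L.Nodup) :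
    (pvEnumDict L).items = (PySem.List.enumerate L 0).map (fun p => (p.2, p.1)) := by
  have hfresh : ∀ p ∈ PySem.List.enumerate L 0, (PySem.Dict.empty (κ := α) (ν := Int)).contains p.2 = false := by
    intro p _; exact PySem.Dict.contains_empty _
  have hnd : ((PySem.List.enumerate L 0).map (fun p => p.2)).Nodup := by
    rw [PySem.List.map_snd_enumerate]; exact h
  simpa [pvEnumDict] using PySem.Dict.items_foldl_insert_fresh (PySem.List.enumerate L 0)
    (fun p => p.2) (fun p => p.1) PySem.Dict.empty hfresh hnd

theorem pvEnumDict_getD {α : Type} [BEq α] [LawfulBEq α] (L : List α) (h : L.Nodup) (x : α) (hx : x ∈ L) :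
    (pvEnumDict L).getD x 0 = (L.idxOf x : Int) := by
  have hlt : L.idxOf x < L.length := List.idxOf_lt_length_of_mem hx
  have hget : L[L.idxOf x] = x := List.getElem_idxOf hlt
  have hmem : ((L.idxOf x : Int), x) ∈ PySem.List.enumerate L 0 := by
    have := PySem.List.getElem?_enumerate L 0 (L.idxOf x)
    rw [List.getElem?_eq_getElem hlt, hget] at this
    simp only [Option.map_some, zero_add] at this
    exact List.mem_of_getElem? this
  have hmemitems : (x, (L.idxOf x : Int)) ∈ (pvEnumDict L).items := by
    rw [pvEnumDict_items L h]
    exact List.mem_map.mpr ⟨_, hmem, rfl⟩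
  have hkeys : (pvEnumDict L).keys.Nodup := by
    unfold PySem.Dict.keys
    rw [pvEnumDict_items L h]
    simp only [List.map_map]
    rw [show ((fun (q : α × Int) => q.1) ∘ (fun (p : Int × α) => (p.2, p.1))) = (fun p => p.2) from rfl,
      PySem.List.map_snd_enumerate]
    exact h
  rw [PySem.Dict.getD_eq_get?_getD, PySem.Dict.get?_of_mem_items _ hmemitems hkeys]
  rfl

theorem pvKeys_mapform (K : List (Int × Int)) (g : (Int × Int) → List (Int × Int))
    (d : PySem.Dict (Int × Int) (List (Int × Int))) (hd : d.items = K.map (fun k => (k, g k))) :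
    d.keys = K := by
  show d.items.map _ = K
  rw [hd, List.map_map]
  exact List.map_id K

theorem pvModify_mapform (K : List (Int × Int)) (hK : K.Nodup)
    (g : (Int × Int) → List (Int × Int)) (d : PySem.Dict (Int × Int) (List (Int × Int)))
    (hd : d.items = K.map (fun k => (k, g k))) (k0 : Int × Int) (hk0 : k0 ∈ K)
    (f : List (Int × Int) → List (Int × Int)) :
    (d.modify k0 [] f).items = K.map (fun k => (k, pvUpd g k0 f k)) := by
  have hkeys : d.keys = K := pvKeys_mapform K g d hd
  have hknd : d.keys.Nodup := by rw [hkeys]; exact hK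
  have hmem : (k0, g k0) ∈ d.items := by rw [hd]; exact List.mem_map.mpr ⟨k0, hk0, rfl⟩
  have hget : d.getD k0 [] = g k0 := PySem.Dict.getD_of_mem_items d hmem hknd []
  have hcont : d.contains k0 = true := (PySem.Dict.contains_iff_mem_keys d k0).mpr (by rw [hkeys]; exact hk0)
  show (d.insert k0 (f (d.getD k0 []))).items = _
  rw [hget, PySem.Dict.items_insert_of_contains d _ hcont, hd, List.map_map]
  apply List.map_congr_left
  intro k hk
  simp only [Function.comp_apply, pvUpd]
  by_cases h : k = k0
  · subst h; simp
  · simp [h]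

theorem pvPartial_nil (Gd : PySem.Dict Int (List Int)) (bd : PySem.Dict Int Int)
    (w : Int) (k : Int × Int) : pvPartial Gd bd w [] k = [] := by
  unfold pvPartial
  split_ifs with h1 h2
  · simp
  · simp at h2
  · rfl

theorem pvPartial_full (Gd : PySem.Dict Int (List Int)) (bd : PySem.Dict Int Int)
    (w : Int) (k : Int × Int) : pvPartial Gd bd w (Gd.getD w []) k = pvContrib Gd bd k w := by
  unfold pvPartial pvContrib
  by_cases h : k.1 = w
  · rw [if_pos h, if_pos h.symm, h]
  · rw [if_neg h, if_neg (show ¬ (w = k.1) from fun hc => h hc.symm)]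

theorem pvPartial_extend_skip (Gd : PySem.Dict Int (List Int)) (bd : PySem.Dict Int Int)
    (w : Int) (Q : List Int) (u : Int) (hwu : ¬ w < u) (k : Int × Int) :
    pvPartial Gd bd w (Q ++ [u]) k = pvPartial Gd bd w Q k := by
  unfold pvPartial
  by_cases h : k.1 = w
  · rw [if_pos h, if_pos h, List.filter_append]
    simp [hwu]
  · rw [if_neg h, if_neg h]
    by_cases hwk : w < k.1
    · have huk : k.1 ≠ u := by intro hc; subst hc; exact hwu hwk
      simp [hwk, huk]
    · simp [hwk]

theorem pvPartial_extend_other (Gd : PySem.Dict Int (List Int)) (bd : PySem.Dict Int Int)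
    (w u : Int) (Q : List Int) (k : Int × Int) (hk1w : ¬ k.1 = w) (hk1u : ¬ k.1 = u) :
    pvPartial Gd bd w (Q ++ [u]) k = pvPartial Gd bd w Q k := by
  unfold pvPartial
  rw [if_neg hk1w, if_neg hk1w]
  have : (Q ++ [u]).contains k.1 = Q.contains k.1 := by
    simp [hk1u]
  rw [this]

-- the Set.add A performs on a "forward" key (w,t) extends the partial list at its end
theorem pvValue_step_fwd (Gd : PySem.Dict Int (List Int)) (bd : PySem.Dict Int Int)
    (w u : Int) (hwu : w < u) (Q : List Int) (base : (Int × Int) → List (Int × Int))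
    (k : Int × Int) (hk1 : k.1 = w) :
    PySem.Set.add (PySem.Set.ofList (base k ++ pvPartial Gd bd w Q k))
        (u, PySem.Int.bxor k.2 (PySem.Int.bxor (bd.getD w 0) (bd.getD u 0))) =
      PySem.Set.ofList (base k ++ pvPartial Gd bd w (Q ++ [u]) k) := by
  have hnew : pvPartial Gd bd w (Q ++ [u]) k =
      pvPartial Gd bd w Q k ++ [(u, PySem.Int.bxor k.2 (PySem.Int.bxor (bd.getD w 0) (bd.getD u 0)))] := by
    unfold pvPartial
    rw [if_pos hk1, if_pos hk1, List.filter_append]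
    simp [hwu]
  rw [hnew, ← List.append_assoc, PySem.Set.ofList_append_singleton]

-- the Set.add A performs on a "backward" key (u,t): a fresh append the first time, a no-op after
theorem pvValue_step_bwd (Gd : PySem.Dict Int (List Int)) (bd : PySem.Dict Int Int)
    (w u : Int) (hwu : w < u) (Q : List Int) (base : (Int × Int) → List (Int × Int))
    (k : Int × Int) (x : Int × Int)
    (hx : x.1 = w ∧ k.1 = u ∧ x.2 = PySem.Int.bxor k.2 (PySem.Int.bxor (bd.getD w 0) (bd.getD u 0))) :
    PySem.Set.add (PySem.Set.ofList (base k ++ pvPartial Gd bd w Q k)) x =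
      PySem.Set.ofList (base k ++ pvPartial Gd bd w (Q ++ [u]) k) := by
  obtain ⟨hx1, hk1, hx2⟩ := hx
  have hkw : ¬ k.1 = w := by omega
  have hcond : w < k.1 ∧ (Q ++ [u]).contains k.1 = true := by
    refine ⟨by omega, ?_⟩
    simp [hk1]
  have hxval : x = (w, PySem.Int.bxor k.2 (PySem.Int.bxor (bd.getD w 0) (bd.getD k.1 0))) := by
    rw [hk1]
    exact Prod.ext hx1 hx2
  by_cases hQ : Q.contains k.1 = true
  · have hold : pvPartial Gd bd w Q k = [(w, PySem.Int.bxor k.2 (PySem.Int.bxor (bd.getD w 0) (bd.getD k.1 0)))] := by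
      unfold pvPartial
      rw [if_neg hkw, if_pos ⟨by omega, hQ⟩]
    have hnew : pvPartial Gd bd w (Q ++ [u]) k = pvPartial Gd bd w Q k := by
      unfold pvPartial
      rw [if_neg hkw, if_neg hkw, if_pos hcond, if_pos ⟨by omega, hQ⟩]
    rw [hnew, PySem.Set.add_of_mem]
    rw [PySem.Set.mem_ofList, hold, hxval]
    simp
  · have hold : pvPartial Gd bd w Q k = [] := by
      unfold pvPartial
      rw [if_neg hkw]
      rw [if_neg (fun hc => hQ hc.2)]
    have hnew : pvPartial Gd bd w (Q ++ [u]) k = [x] := by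
      unfold pvPartial
      rw [if_neg hkw, if_pos hcond, hxval]
    rw [hold, hnew, ← PySem.Set.ofList_append_singleton]
    simp

-- one edge (w,u) with w<u: A's four Set.adds advance every key's partial list from Q to Q ++ [u]
theorem pvInner_edge (ks : List Int) (hndks : ks.Nodup)
    (Gd : PySem.Dict Int (List Int)) (bd : PySem.Dict Int Int)
    (w u : Int) (hw : w ∈ ks) (hu : u ∈ ks) (hwu : w < u)
    (ha : PySem.Int.bxor (bd.getD w 0) (bd.getD u 0) = 0 ∨ PySem.Int.bxor (bd.getD w 0) (bd.getD u 0) = 1)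
    (Q : List Int) (base : (Int × Int) → List (Int × Int))
    (d : PySem.Dict (Int × Int) (List (Int × Int)))
    (hd : d.items = (pvKof ks).map (fun k => (k, PySem.Set.ofList (base k ++ pvPartial Gd bd w Q k)))) :
    ([(0 : Int), 1].foldl (fun H s =>
        (H.modify (w, s) [] (fun S => PySem.Set.add S (u, PySem.Int.bxor s (PySem.Int.bxor (bd.getD w 0) (bd.getD u 0))))).modify
          (u, PySem.Int.bxor s (PySem.Int.bxor (bd.getD w 0) (bd.getD u 0))) []
          (fun S => PySem.Set.add S (w, s))) d).items =
      (pvKof ks).map (fun k => (k, PySem.Set.ofList (base k ++ pvPartial Gd bd w (Q ++ [u]) k))) := by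
  have hK := pvNodup_Kof ks hndks
  have hne : w ≠ u := by omega
  have hmw0 : ((w : Int), (0 : Int)) ∈ pvKof ks := (pvMem_Kof ks _).mpr ⟨hw, Or.inl rfl⟩
  have hmw1 : ((w : Int), (1 : Int)) ∈ pvKof ks := (pvMem_Kof ks _).mpr ⟨hw, Or.inr rfl⟩
  have ha0 : PySem.Int.bxor 0 (PySem.Int.bxor (bd.getD w 0) (bd.getD u 0)) = 0 ∨
      PySem.Int.bxor 0 (PySem.Int.bxor (bd.getD w 0) (bd.getD u 0)) = 1 := by
    rcases ha with h | h <;> rw [h] <;> [left; right] <;> decide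
  have ha1 : PySem.Int.bxor 1 (PySem.Int.bxor (bd.getD w 0) (bd.getD u 0)) = 0 ∨
      PySem.Int.bxor 1 (PySem.Int.bxor (bd.getD w 0) (bd.getD u 0)) = 1 := by
    rcases ha with h | h <;> rw [h] <;> [right; left] <;> decide
  have hmu0 : ((u : Int), PySem.Int.bxor 0 (PySem.Int.bxor (bd.getD w 0) (bd.getD u 0))) ∈ pvKof ks :=
    (pvMem_Kof ks _).mpr ⟨hu, ha0⟩
  have hmu1 : ((u : Int), PySem.Int.bxor 1 (PySem.Int.bxor (bd.getD w 0) (bd.getD u 0))) ∈ pvKof ks :=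
    (pvMem_Kof ks _).mpr ⟨hu, ha1⟩
  have hne01 : PySem.Int.bxor 0 (PySem.Int.bxor (bd.getD w 0) (bd.getD u 0)) ≠
      PySem.Int.bxor 1 (PySem.Int.bxor (bd.getD w 0) (bd.getD u 0)) := by
    rcases ha with h | h <;> rw [h] <;> decide
  simp only [List.foldl_cons, List.foldl_nil]
  have h1 := pvModify_mapform _ hK _ d hd ((w : Int), (0 : Int)) hmw0
    (fun S => PySem.Set.add S (u, PySem.Int.bxor 0 (PySem.Int.bxor (bd.getD w 0) (bd.getD u 0))))
  have h2 := pvModify_mapform _ hK _ _ h1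
    ((u : Int), PySem.Int.bxor 0 (PySem.Int.bxor (bd.getD w 0) (bd.getD u 0))) hmu0
    (fun S => PySem.Set.add S ((w : Int), (0 : Int)))
  have h3 := pvModify_mapform _ hK _ _ h2 ((w : Int), (1 : Int)) hmw1
    (fun S => PySem.Set.add S (u, PySem.Int.bxor 1 (PySem.Int.bxor (bd.getD w 0) (bd.getD u 0))))
  have h4 := pvModify_mapform _ hK _ _ h3
    ((u : Int), PySem.Int.bxor 1 (PySem.Int.bxor (bd.getD w 0) (bd.getD u 0))) hmu1
    (fun S => PySem.Set.add S ((w : Int), (1 : Int)))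
  rw [h4]
  apply List.map_congr_left
  intro k hkK
  obtain ⟨hk1, hk2⟩ := (pvMem_Kof ks k).mp hkK
  obtain ⟨k1, k2⟩ := k
  simp only at hk1 hk2
  congr 1
  by_cases e1 : k1 = w
  · subst e1
    have n01 : ¬ (((k1 : Int), (0 : Int)) = ((k1 : Int), (1 : Int))) := by simp
    have n10 : ¬ (((k1 : Int), (1 : Int)) = ((k1 : Int), (0 : Int))) := by simp
    have nU0 : ∀ t : Int, ¬ (((k1 : Int), t) =
        ((u : Int), PySem.Int.bxor 0 (PySem.Int.bxor (bd.getD k1 0) (bd.getD u 0)))) := by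
      intro t; simp [Prod.ext_iff, hne]
    have nU1 : ∀ t : Int, ¬ (((k1 : Int), t) =
        ((u : Int), PySem.Int.bxor 1 (PySem.Int.bxor (bd.getD k1 0) (bd.getD u 0)))) := by
      intro t; simp [Prod.ext_iff, hne]
    rcases hk2 with h2 | h2 <;> subst h2
    · rw [pvUpd_ne _ _ _ _ (nU1 0), pvUpd_ne _ _ _ _ n01, pvUpd_ne _ _ _ _ (nU0 0),
        pvUpd_eq _ _ _ _ rfl]
      exact pvValue_step_fwd Gd bd k1 u hwu Q base (k1, 0) rfl
    · rw [pvUpd_ne _ _ _ _ (nU1 1), pvUpd_eq _ _ _ _ rfl, pvUpd_ne _ _ _ _ (nU0 1),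
        pvUpd_ne _ _ _ _ n10]
      exact pvValue_step_fwd Gd bd k1 u hwu Q base (k1, 1) rfl
  · by_cases e2 : k1 = u
    · subst e2
      have nW0 : ∀ t : Int, ¬ (((k1 : Int), t) = ((w : Int), (0 : Int))) := by
        intro t; simp [Prod.ext_iff, e1]
      have nW1 : ∀ t : Int, ¬ (((k1 : Int), t) = ((w : Int), (1 : Int))) := by
        intro t; simp [Prod.ext_iff, e1]
      have n01 : ¬ (((k1 : Int), (0 : Int)) = ((k1 : Int), (1 : Int))) := by simp
      have n10 : ¬ (((k1 : Int), (1 : Int)) = ((k1 : Int), (0 : Int))) := by simp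
      rcases ha with hA | hA
      · -- b[w]^b[u] = 0: the backward keys are (u,0) and (u,1) in this order
        have e0 : PySem.Int.bxor 0 (PySem.Int.bxor (bd.getD w 0) (bd.getD k1 0)) = 0 := by
          rw [hA]; decide
        have e1b : PySem.Int.bxor 1 (PySem.Int.bxor (bd.getD w 0) (bd.getD k1 0)) = 1 := by
          rw [hA]; decide
        rw [e0, e1b]
        rcases hk2 with h2 | h2 <;> subst h2
        · rw [pvUpd_ne _ _ _ _ n01, pvUpd_ne _ _ _ _ (nW1 0), pvUpd_eq _ _ _ _ rfl,
            pvUpd_ne _ _ _ _ (nW0 0)]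
          exact pvValue_step_bwd Gd bd w k1 hwu Q base (k1, 0) (w, 0) ⟨rfl, rfl, e0.symm⟩
        · rw [pvUpd_eq _ _ _ _ rfl, pvUpd_ne _ _ _ _ (nW1 1), pvUpd_ne _ _ _ _ n10,
            pvUpd_ne _ _ _ _ (nW0 1)]
          exact pvValue_step_bwd Gd bd w k1 hwu Q base (k1, 1) (w, 1) ⟨rfl, rfl, e1b.symm⟩
      · -- b[w]^b[u] = 1: the backward keys are (u,1) and (u,0) in this order
        have e0 : PySem.Int.bxor 0 (PySem.Int.bxor (bd.getD w 0) (bd.getD k1 0)) = 1 := by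
          rw [hA]; decide
        have e1b : PySem.Int.bxor 1 (PySem.Int.bxor (bd.getD w 0) (bd.getD k1 0)) = 0 := by
          rw [hA]; decide
        rw [e0, e1b]
        rcases hk2 with h2 | h2 <;> subst h2
        · rw [pvUpd_eq _ _ _ _ rfl, pvUpd_ne _ _ _ _ (nW1 0), pvUpd_ne _ _ _ _ n01,
            pvUpd_ne _ _ _ _ (nW0 0)]
          exact pvValue_step_bwd Gd bd w k1 hwu Q base (k1, 0) (w, 1) ⟨rfl, rfl, e0.symm⟩
        · rw [pvUpd_ne _ _ _ _ n10, pvUpd_ne _ _ _ _ (nW1 1), pvUpd_eq _ _ _ _ rfl,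
            pvUpd_ne _ _ _ _ (nW0 1)]
          exact pvValue_step_bwd Gd bd w k1 hwu Q base (k1, 1) (w, 0) ⟨rfl, rfl, e1b.symm⟩
    · have nW : ∀ t : Int, ¬ (((k1 : Int), k2) = ((w : Int), t)) := by
        intro t; simp [Prod.ext_iff, e1]
      have nU : ∀ t : Int, ¬ (((k1 : Int), k2) = ((u : Int), t)) := by
        intro t; simp [Prod.ext_iff, e2]
      rw [pvUpd_ne _ _ _ _ (nU _), pvUpd_ne _ _ _ _ (nW _), pvUpd_ne _ _ _ _ (nU _),
        pvUpd_ne _ _ _ _ (nW _)]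
      rw [pvPartial_extend_other Gd bd w u Q (k1, k2) e1 e2]

-- A's whole adjacency scan of vertex w advances every key's partial list from Q to Q ++ rest
theorem pvInner_fold (ks : List Int) (hndks : ks.Nodup)
    (Gd : PySem.Dict Int (List Int)) (bd : PySem.Dict Int Int)
    (w : Int) (hw : w ∈ ks) (base : (Int × Int) → List (Int × Int))
    (rest : List Int) :
    ∀ (Q : List Int) (d : PySem.Dict (Int × Int) (List (Int × Int))),
    (∀ u ∈ rest, w < u → u ∈ ks ∧
      (PySem.Int.bxor (bd.getD w 0) (bd.getD u 0) = 0 ∨ PySem.Int.bxor (bd.getD w 0) (bd.getD u 0) = 1)) →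
    d.items = (pvKof ks).map (fun k => (k, PySem.Set.ofList (base k ++ pvPartial Gd bd w Q k))) →
    ((rest.foldl (fun H u =>
        if w < u then
          let a := PySem.Int.bxor (bd.getD w 0) (bd.getD u 0)
          [(0 : Int), 1].foldl (fun H s =>
            let H' := H.modify (w, s) [] (fun S => PySem.Set.add S (u, PySem.Int.bxor s a))
            H'.modify (u, PySem.Int.bxor s a) [] (fun S => PySem.Set.add S (w, s))) H
        else H) d).items =
      (pvKof ks).map (fun k => (k, PySem.Set.ofList (base k ++ pvPartial Gd bd w (Q ++ rest) k)))) := by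
  induction rest with
  | nil =>
    intro Q d _ hd
    simpa using hd
  | cons u rest ih =>
    intro Q d hcond hd
    simp only [List.foldl_cons]
    by_cases hwu : w < u
    · rw [if_pos hwu]
      obtain ⟨huks, ha⟩ := hcond u (by simp) hwu
      have hstep := pvInner_edge ks hndks Gd bd w u hw huks hwu ha Q base d hd
      have := ih (Q ++ [u]) _ (fun u' hu' => hcond u' (by simp [hu'])) hstep
      simpa using this
    · rw [if_neg hwu]
      have hd' : d.items = (pvKof ks).map (fun k => (k, PySem.Set.ofList (base k ++ pvPartial Gd bd w (Q ++ [u]) k))) := by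
        rw [hd]
        apply List.map_congr_left
        intro k _
        rw [pvPartial_extend_skip Gd bd w Q u hwu k]
      have := ih (Q ++ [u]) d (fun u' hu' => hcond u' (by simp [hu'])) hd'
      simpa using this

-- A's whole edge loop: the final H is, per key, exactly B's gathered row sequence (deduplicated)
theorem pvOuter_fold (ks : List Int) (hndks : ks.Nodup)
    (Gd : PySem.Dict Int (List Int)) (bd : PySem.Dict Int Int)
    (ws : List Int) :
    ∀ (base : (Int × Int) → List (Int × Int)) (d : PySem.Dict (Int × Int) (List (Int × Int))),
    (∀ w ∈ ws, w ∈ ks) →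
    (∀ w ∈ ws, ∀ u ∈ Gd.getD w [], w < u → u ∈ ks ∧
      (PySem.Int.bxor (bd.getD w 0) (bd.getD u 0) = 0 ∨ PySem.Int.bxor (bd.getD w 0) (bd.getD u 0) = 1)) →
    d.items = (pvKof ks).map (fun k => (k, PySem.Set.ofList (base k))) →
    ((ws.foldl (fun H v =>
        (Gd.getD v []).foldl (fun H u =>
          if v < u then
            let a := PySem.Int.bxor (bd.getD v 0) (bd.getD u 0)
            [(0 : Int), 1].foldl (fun H s =>
              let H' := H.modify (v, s) [] (fun S => PySem.Set.add S (u, PySem.Int.bxor s a))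
              H'.modify (u, PySem.Int.bxor s a) [] (fun S => PySem.Set.add S (v, s))) H
          else H) H) d).items =
      (pvKof ks).map (fun k => (k, PySem.Set.ofList (base k ++ ws.flatMap (fun w => pvContrib Gd bd k w))))) := by
  induction ws with
  | nil =>
    intro base d _ _ hd
    simpa using hd
  | cons w ws ih =>
    intro base d hws hedge hd
    have hd0 : d.items = (pvKof ks).map (fun k => (k, PySem.Set.ofList (base k ++ pvPartial Gd bd w [] k))) := by
      rw [hd]
      apply List.map_congr_left
      intro k _
      rw [pvPartial_nil, List.append_nil]
    have hin := pvInner_fold ks hndks Gd bd w (hws w (by simp)) base (Gd.getD w []) [] d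
      (fun u hu => hedge w (by simp) u hu) hd0
    rw [show (List.map (fun k => (k, PySem.Set.ofList (base k ++ pvPartial Gd bd w ([] ++ Gd.getD w []) k))) (pvKof ks)) =
        (List.map (fun k => (k, PySem.Set.ofList ((fun k => base k ++ pvContrib Gd bd k w) k))) (pvKof ks)) from
      List.map_congr_left (fun k _ => by rw [List.nil_append, pvPartial_full])] at hin
    have hfin := ih (fun k => base k ++ pvContrib Gd bd k w) _
      (fun w' hw' => hws w' (by simp [hw'])) (fun w' hw' => hedge w' (by simp [hw'])) hin
    exact hfin.trans (List.map_congr_left (fun k _ => by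
      rw [List.flatMap_cons, List.append_assoc]))

-- the initial dict: every key of pvKof ks mapped to the empty set
theorem pvInitA (ks : List Int) :
    ks.foldl (fun H v => [(0 : Int), 1].foldl (fun H s => H.insert (v, s) PySem.Set.empty) H)
      (PySem.Dict.empty (κ := Int × Int) (ν := PySem.Set (Int × Int))) =
    (pvKof ks).foldl (fun H k => H.insert k PySem.Set.empty) PySem.Dict.empty := by
  unfold pvKof
  rw [List.foldl_flatMap]
  apply PySem.List.foldl_congr_mem'
  intro v _ acc
  rfl

theorem pvInitA_items (ks : List Int) (hnd : ks.Nodup) :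
    ((pvKof ks).foldl (fun H k => H.insert k PySem.Set.empty)
      (PySem.Dict.empty (κ := Int × Int) (ν := PySem.Set (Int × Int)))).items =
    (pvKof ks).map (fun k => (k, PySem.Set.ofList ([] : List (Int × Int)))) := by
  have := PySem.Dict.items_foldl_insert_fresh (pvKof ks) (fun k => k)
    (fun _ => (PySem.Set.empty : PySem.Set (Int × Int))) PySem.Dict.empty
    (fun a _ => PySem.Dict.contains_empty a) (by simpa using pvNodup_Kof ks hnd)
  simpa using this

-- the labels of the 2n keys are pairwise distinct
theorem pvNodup_map_lab (ks : List Int) (hnd : ks.Nodup) :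
    ((pvKof ks).map (fun k =>
      (pvEnumDict (PySem.List.sorted2 (pvKof ks) (fun p => p.1) (fun p => p.2) false)).getD k 0)).Nodup := by
  have hperm : (PySem.List.sorted2 (pvKof ks) (fun p => p.1) (fun p => p.2) false).Perm (pvKof ks) :=
    PySem.List.sorted2_perm _ _ _ _
  have hndSK : (PySem.List.sorted2 (pvKof ks) (fun p => p.1) (fun p => p.2) false).Nodup :=
    hperm.nodup_iff.mpr (pvNodup_Kof ks hnd)
  refine (List.nodup_map_iff_inj_on (pvNodup_Kof ks hnd)).mpr ?_
  intro x hx y hy hxy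
  rw [pvEnumDict_getD _ hndSK x (hperm.mem_iff.mpr hx),
    pvEnumDict_getD _ hndSK y (hperm.mem_iff.mpr hy)] at hxy
  exact (List.idxOf_inj (hperm.mem_iff.mpr hx)).mp (by exact_mod_cast hxy)

-- B's row scan gathers exactly the concatenated contributions
theorem pvRowSeq (ks : List Int) (Gd : PySem.Dict Int (List Int)) (bd : PySem.Dict Int Int)
    (v t : Int) :
    ks.foldl (fun seq w =>
      if w == v then
        seq ++ ((Gd.getD v []).filter (fun u => decide (v < u))).map
          (fun u => (u, PySem.Int.bxor t (PySem.Int.bxor (bd.getD v 0) (bd.getD u 0))))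
      else if decide (w < v) && (Gd.getD w []).contains v then
        seq ++ [(w, PySem.Int.bxor t (PySem.Int.bxor (bd.getD w 0) (bd.getD v 0)))]
      else seq) [] = ks.flatMap (fun w => pvContrib Gd bd (v, t) w) := by
  have hcongr : ∀ w ∈ ks, ∀ (seq : List (Int × Int)),
      (if w == v then
        seq ++ ((Gd.getD v []).filter (fun u => decide (v < u))).map
          (fun u => (u, PySem.Int.bxor t (PySem.Int.bxor (bd.getD v 0) (bd.getD u 0))))
      else if decide (w < v) && (Gd.getD w []).contains v then
        seq ++ [(w, PySem.Int.bxor t (PySem.Int.bxor (bd.getD w 0) (bd.getD v 0)))]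
      else seq) = seq ++ pvContrib Gd bd (v, t) w := by
    intro w _ seq
    by_cases hwv : w = v
    · subst hwv
      simp [pvContrib]
    · rw [if_neg (by simpa using hwv)]
      by_cases h1 : w < v
      · by_cases h2 : v ∈ Gd.getD w []
        · simp [pvContrib, hwv, h1, h2]
        · simp [pvContrib, hwv, h1, h2]
      · simp [pvContrib, hwv, h1]
  rw [PySem.List.foldl_congr_mem' ks _ (fun seq w => seq ++ pvContrib Gd bd (v, t) w) [] hcongr,
    PySem.List.foldl_append_eq_flatMap]
  rfl

-- ===== VERDICT (by name: the statement is the Claim_ definition above) =====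
theorem cfi_expander_lift_spec : Claim_equal_cfi_expander_lift := by
  intro G b _ hPre
  unfold Spec_cfi_expander_lift
  obtain ⟨hndG, hndB, hedge0⟩ := hPre
  simp only [cfi_expander_lift, cfi_expander_lift_alt]
  set Gd : PySem.Dict Int (List Int) := PySem.Dict.mk G with hGd
  set bd : PySem.Dict Int Int := PySem.Dict.mk b with hbd
  set ks := Gd.keys with hksdef
  have hndks : ks.Nodup := hndG
  -- the edge-side facts Pre_ provides, phrased through the dict lookups the ports use
  have hedge : ∀ w ∈ ks, ∀ u ∈ Gd.getD w [], w < u → u ∈ ks ∧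
      (PySem.Int.bxor (bd.getD w 0) (bd.getD u 0) = 0 ∨ PySem.Int.bxor (bd.getD w 0) (bd.getD u 0) = 1) := by
    intro w hwks u hu hwu
    have hwg : w ∈ G.map Prod.fst := hwks
    obtain ⟨p, hp, hpeq⟩ := List.mem_map.mp hwg
    have hmem : (w, p.2) ∈ Gd.items := by
      have hep : (w, p.2) = p := by rw [← hpeq]
      rw [hep]; exact hp
    have hget : Gd.getD w [] = p.2 := by
      rw [PySem.Dict.getD_eq_get?_getD, PySem.Dict.get?_of_mem_items Gd hmem hndks]
      rfl
    rw [hget] at hu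
    obtain ⟨huG, _, _, ha⟩ := hedge0 p hp u hu (hpeq ▸ hwu)
    rw [hpeq] at ha
    exact ⟨huG, ha⟩
  -- A's H1 in map form
  rw [pvInitA ks]
  have hH1 := pvOuter_fold ks hndks Gd bd ks (fun _ => []) _ (fun w hw => hw) hedge
    (pvInitA_items ks hndks)
  simp only [List.nil_append] at hH1
  -- both label dicts are the same dict over the sorted key list
  have hkeys : (ks.foldl (fun H v =>
      (Gd.getD v []).foldl (fun H u =>
        if v < u then
          let a := PySem.Int.bxor (bd.getD v 0) (bd.getD u 0)
          [(0 : Int), 1].foldl (fun H s =>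
            let H' := H.modify (v, s) [] (fun S => PySem.Set.add S (u, PySem.Int.bxor s a))
            H'.modify (u, PySem.Int.bxor s a) [] (fun S => PySem.Set.add S (v, s))) H
        else H) H) ((pvKof ks).foldl (fun H k => H.insert k PySem.Set.empty) PySem.Dict.empty)).keys = pvKof ks :=
    pvKeys_mapform _ _ _ hH1
  have hBkof : ks.flatMap (fun v => [((v : Int), (0 : Int)), (v, 1)]) = pvKof ks := rfl
  rw [hkeys, hH1, hBkof]
  rw [show (List.foldl (fun (d : PySem.Dict (Int × Int) Int) (p : Int × (Int × Int)) => d.insert p.2 p.1)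
      PySem.Dict.empty
      (PySem.List.enumerate (PySem.List.sorted2 (pvKof ks) (fun p => p.1) (fun p => p.2) false) 0)) =
    pvEnumDict (PySem.List.sorted2 (pvKof ks) (fun p => p.1) (fun p => p.2) false) from rfl]
  set lab := pvEnumDict (PySem.List.sorted2 (pvKof ks) (fun p => p.1) (fun p => p.2) false) with hlab
  -- A's output fold: over the map-form items, with pairwise distinct fresh labels
  simp only [List.foldl_map]
  have hfreshA := PySem.Dict.items_foldl_insert_fresh (pvKof ks)
    (fun k => lab.getD k 0)
    (fun k => PySem.Set.ofList ((PySem.Set.ofList (ks.flatMap (fun w => pvContrib Gd bd k w))).map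
      (fun u => lab.getD u 0)))
    PySem.Dict.empty (fun a _ => PySem.Dict.contains_empty _) (pvNodup_map_lab ks hndks)
  rw [hfreshA]
  -- B's output fold: collapse the two-element inner loop into a fold over pvKof ks
  have hBfold : (ks.foldl (fun r v =>
      [(0 : Int), 1].foldl (fun r t => r.insert (lab.getD (v, t) 0)
        (PySem.Set.ofList ((PySem.List.dedup (ks.foldl (fun seq w =>
          if w == v then
            seq ++ ((Gd.getD v []).filter (fun u => decide (v < u))).map
              (fun u => (u, PySem.Int.bxor t (PySem.Int.bxor (bd.getD v 0) (bd.getD u 0))))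
          else if decide (w < v) && (Gd.getD w []).contains v then
            seq ++ [(w, PySem.Int.bxor t (PySem.Int.bxor (bd.getD w 0) (bd.getD v 0)))]
          else seq) [])).map (fun k => lab.getD k 0)))) r)
      (PySem.Dict.empty (κ := Int) (ν := PySem.Set Int))) =
      ((pvKof ks).foldl (fun r k => r.insert (lab.getD k 0)
        (PySem.Set.ofList ((PySem.List.dedup (ks.foldl (fun seq w =>
          if w == k.1 then
            seq ++ ((Gd.getD k.1 []).filter (fun u => decide (k.1 < u))).map
              (fun u => (u, PySem.Int.bxor k.2 (PySem.Int.bxor (bd.getD k.1 0) (bd.getD u 0))))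
          else if decide (w < k.1) && (Gd.getD w []).contains k.1 then
            seq ++ [(w, PySem.Int.bxor k.2 (PySem.Int.bxor (bd.getD w 0) (bd.getD k.1 0)))]
          else seq) [])).map (fun k => lab.getD k 0)))) PySem.Dict.empty) := by
    unfold pvKof
    rw [List.foldl_flatMap]
    apply PySem.List.foldl_congr_mem'
    intro v _ acc
    rfl
  rw [hBfold]
  have hfreshB := PySem.Dict.items_foldl_insert_fresh (pvKof ks)
    (fun k => lab.getD k 0)
    (fun k => PySem.Set.ofList ((PySem.List.dedup (ks.foldl (fun seq w =>
          if w == k.1 then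
            seq ++ ((Gd.getD k.1 []).filter (fun u => decide (k.1 < u))).map
              (fun u => (u, PySem.Int.bxor k.2 (PySem.Int.bxor (bd.getD k.1 0) (bd.getD u 0))))
          else if decide (w < k.1) && (Gd.getD w []).contains k.1 then
            seq ++ [(w, PySem.Int.bxor k.2 (PySem.Int.bxor (bd.getD w 0) (bd.getD k.1 0)))]
          else seq) [])).map (fun k => lab.getD k 0)))
    PySem.Dict.empty (fun a _ => PySem.Dict.contains_empty _) (pvNodup_map_lab ks hndks)
  rw [hfreshB]
  simp only [List.nil_append]
  -- per-key: A's deduplicated set is literally B's deduplicated row sequence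
  apply List.map_congr_left
  intro k _
  obtain ⟨k1, k2⟩ := k
  congr 2
  rw [pvRowSeq ks Gd bd k1 k2, PySem.List.dedup_eq_ofList]
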